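-- pv_equiv track=rewrite | github.com/mlcommons/croissant | python/mlcroissant/mlcroissant/_src/geo/nasa_umm_converter.py | extract_access_methods
-- ===== SOURCE A (Python) =====
-- from typing import Any, Dict, List, Optional, Union
--
-- def extract_access_methods(umm: Dict[str, Any]) -> Dict[str, int]:
--     """Extract access methods from related URLs."""
--     related_urls = umm.get("RelatedUrls", [])
--     access_methods = {"https": 0, "s3": 0, "other": 0}
--     for url_info in related_urls:
--         url = url_info.get("URL", "")
--         if url.startswith("https"):
--             access_methods["https"] += 1
--         elif "s3://" in url:
--             access_methods["s3"] += 1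
--         else:
--             access_methods["other"] += 1
--     return access_methods
-- ===== SOURCE B (Python) =====
-- def extract_access_methods(umm):
--     """Extract access methods from related URLs."""
--     def classify(ui):
--         u = ui.get("URL", "")
--         if u.startswith("https"):
--             return (1, 0, 0)
--         if "s3://" in u:
--             return (0, 1, 0)
--         return (0, 0, 1)
--
--     def go(infos):
--         if not infos:
--             return (0, 0, 0)
--         if len(infos) == 1:
--             return classify(infos[0])
--         mid = len(infos) // 2
--         a = go(infos[:mid])
--         b = go(infos[mid:])
--         return (a[0] + b[0], a[1] + b[1], a[2] + b[2])
--
--     h, s, o = go(umm.get("RelatedUrls", []))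
--     return {"https": h, "s3": s, "other": o}
-- ===== Notes on version B (the rewrite author's own statement) =====
-- stated objective: alternative
-- what changed: Replaces the single branching loop that mutates a pre-built counter dict with a divide-and-conquer recursion: each URL is mapped to a unit count triple and halves of the list are combined by componentwise triple addition, the dict being assembled only once at the end.
import Mathlib
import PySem

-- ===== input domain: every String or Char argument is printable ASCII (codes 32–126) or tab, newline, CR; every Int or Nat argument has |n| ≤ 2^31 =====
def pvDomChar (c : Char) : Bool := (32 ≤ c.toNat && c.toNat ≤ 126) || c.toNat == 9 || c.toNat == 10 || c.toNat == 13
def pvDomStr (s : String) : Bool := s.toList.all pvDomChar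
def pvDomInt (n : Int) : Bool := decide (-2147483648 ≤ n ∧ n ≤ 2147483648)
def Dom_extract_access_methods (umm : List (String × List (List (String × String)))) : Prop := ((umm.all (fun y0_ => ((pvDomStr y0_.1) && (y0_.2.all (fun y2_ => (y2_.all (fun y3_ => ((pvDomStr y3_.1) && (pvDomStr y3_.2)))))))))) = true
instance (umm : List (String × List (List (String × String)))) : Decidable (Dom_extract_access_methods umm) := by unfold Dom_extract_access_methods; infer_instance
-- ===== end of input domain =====

-- B replaces the loop mutating a counter dict with a divide-and-conquer recursion that maps
-- each URL to a unit count triple and merges halves by triple addition; same return value.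

-- ===== PORT A =====
def extract_access_methods (umm : List (String × List (List (String × String)))) : List (String × Int) :=
  let related_urls := (PySem.Dict.mk umm).getD "RelatedUrls" []
  let access_methods : PySem.Dict String Int :=
    ((PySem.Dict.empty.insert "https" 0).insert "s3" 0).insert "other" 0
  let final := related_urls.foldl (fun acc url_info =>
    let url := (PySem.Dict.mk url_info).getD "URL" ""
    if PySem.Str.startswith url "https" then acc.modify "https" 0 (· + 1)
    else if PySem.Str.isIn "s3://" url then acc.modify "s3" 0 (· + 1)
    else acc.modify "other" 0 (· + 1)) access_methods
  final.items

-- ===== PORT B =====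
-- helper `classify` of Source B
def pvClassify (ui : List (String × String)) : Int × Int × Int :=
  let u := (PySem.Dict.mk ui).getD "URL" ""
  if PySem.Str.startswith u "https" then (1, 0, 0)
  else if PySem.Str.isIn "s3://" u then (0, 1, 0)
  else (0, 0, 1)

-- helper `go` of Source B: divide and conquer over the list (slices ported as take/drop)
def pvGo (infos : List (List (String × String))) : Int × Int × Int :=
  if _h0 : infos.length = 0 then (0, 0, 0)
  else if _h1 : infos.length = 1 then pvClassify (infos[0]'(by omega))
  else
    let mid := infos.length / 2
    let a := pvGo (infos.take mid)
    let b := pvGo (infos.drop mid)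
    (a.1 + b.1, a.2.1 + b.2.1, a.2.2 + b.2.2)
termination_by infos.length
decreasing_by
  · simp only [List.length_take]; omega
  · simp only [List.length_drop]; omega

def extract_access_methods_alt (umm : List (String × List (List (String × String)))) : List (String × Int) :=
  let r := pvGo ((PySem.Dict.mk umm).getD "RelatedUrls" [])
  [("https", r.1), ("s3", r.2.1), ("other", r.2.2)]

-- ===== PRECONDITION & SPEC =====
def Spec_extract_access_methods (umm : List (String × List (List (String × String)))) (out : List (String × Int)) : Prop := out = extract_access_methods_alt umm
instance (umm : List (String × List (List (String × String)))) (out : List (String × Int)) : Decidable (Spec_extract_access_methods umm out) := by unfold Spec_extract_access_methods; infer_instance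

-- ===== CLAIM (what is proved, stated in full; the proofs are below) =====
def Claim_equal_extract_access_methods : Prop := ∀ (umm : List (String × List (List (String × String)))), Dom_extract_access_methods umm → Spec_extract_access_methods umm (extract_access_methods umm)

-- ===== LEMMAS AND PROOFS =====

def pvUrl (ui : List (String × String)) : String := (PySem.Dict.mk ui).getD "URL" ""

def pvStep (acc : PySem.Dict String Int) (url_info : List (String × String)) : PySem.Dict String Int :=
  let url := (PySem.Dict.mk url_info).getD "URL" ""
  if PySem.Str.startswith url "https" then acc.modify "https" 0 (· + 1)
  else if PySem.Str.isIn "s3://" url then acc.modify "s3" 0 (· + 1)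
  else acc.modify "other" 0 (· + 1)

theorem modH (h s o : Int) :
    (PySem.Dict.mk [("https", h), ("s3", s), ("other", o)]).modify "https" 0 (· + 1)
    = PySem.Dict.mk [("https", h + 1), ("s3", s), ("other", o)] := rfl

theorem modS (h s o : Int) :
    (PySem.Dict.mk [("https", h), ("s3", s), ("other", o)]).modify "s3" 0 (· + 1)
    = PySem.Dict.mk [("https", h), ("s3", s + 1), ("other", o)] := rfl

theorem modO (h s o : Int) :
    (PySem.Dict.mk [("https", h), ("s3", s), ("other", o)]).modify "other" 0 (· + 1)
    = PySem.Dict.mk [("https", h), ("s3", s), ("other", o + 1)] := rfl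

-- A's fold computes the three filter counts.
theorem fold_items (l : List (List (String × String))) (h s o : Int) :
    ((l.foldl pvStep (PySem.Dict.mk [("https", h), ("s3", s), ("other", o)])).items)
    = [("https", h + (l.countP (fun ui => PySem.Str.startswith (pvUrl ui) "https") : Int)),
       ("s3", s + (l.countP (fun ui => !PySem.Str.startswith (pvUrl ui) "https" && PySem.Str.isIn "s3://" (pvUrl ui)) : Int)),
       ("other", o + (l.countP (fun ui => !PySem.Str.startswith (pvUrl ui) "https" && !PySem.Str.isIn "s3://" (pvUrl ui)) : Int))] := by
  induction l generalizing h s o with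
  | nil => simp
  | cons x xs ih =>
    rw [List.foldl_cons]
    by_cases hx : PySem.Str.startswith (pvUrl x) "https" = true
    · rw [show pvStep (PySem.Dict.mk [("https", h), ("s3", s), ("other", o)]) x
          = PySem.Dict.mk [("https", h + 1), ("s3", s), ("other", o)] by
        simp only [pvStep, pvUrl] at *; rw [if_pos hx]; exact modH h s o]
      rw [ih]
      simp only [List.countP_cons]
      rw [if_pos hx, if_neg (by rw [hx]; simp), if_neg (by rw [hx]; simp)]
      push_cast
      ring_nf
    · by_cases hs2 : PySem.Str.isIn "s3://" (pvUrl x) = true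
      · rw [show pvStep (PySem.Dict.mk [("https", h), ("s3", s), ("other", o)]) x
            = PySem.Dict.mk [("https", h), ("s3", s + 1), ("other", o)] by
          simp only [pvStep, pvUrl] at *
          rw [if_neg hx, if_pos hs2]; exact modS h s o]
        rw [ih]
        simp only [List.countP_cons]
        rw [if_neg hx, if_pos (by rw [Bool.not_eq_true] at hx; rw [hx, hs2]; rfl),
            if_neg (by rw [Bool.not_eq_true] at hx; rw [hx, hs2]; simp)]
        push_cast
        ring_nf
      · rw [show pvStep (PySem.Dict.mk [("https", h), ("s3", s), ("other", o)]) x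
            = PySem.Dict.mk [("https", h), ("s3", s), ("other", o + 1)] by
          simp only [pvStep, pvUrl] at *
          rw [if_neg hx, if_neg hs2]; exact modO h s o]
        rw [ih]
        simp only [List.countP_cons]
        rw [if_neg hx, if_neg (by rw [Bool.not_eq_true] at hx hs2; rw [hx, hs2]; simp),
            if_pos (by rw [Bool.not_eq_true] at hx hs2; rw [hx, hs2]; rfl)]
        push_cast
        ring_nf

-- B's divide-and-conquer recursion computes the same three filter counts.
theorem pvGo_eq (l : List (List (String × String))) :
    pvGo l = ((l.countP (fun ui => PySem.Str.startswith (pvUrl ui) "https") : Int),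
              (l.countP (fun ui => !PySem.Str.startswith (pvUrl ui) "https" && PySem.Str.isIn "s3://" (pvUrl ui)) : Int),
              (l.countP (fun ui => !PySem.Str.startswith (pvUrl ui) "https" && !PySem.Str.isIn "s3://" (pvUrl ui)) : Int)) := by
  fun_induction pvGo l with
  | case1 l h0 =>
    rw [List.length_eq_zero_iff.mp h0]; simp
  | case2 l h0 h1 =>
    obtain ⟨x, hx⟩ := List.length_eq_one_iff.mp h1
    subst hx
    simp only [pvClassify, List.countP_cons, List.countP_nil, List.getElem_cons_zero]
    by_cases hs : PySem.Str.startswith (pvUrl x) "https" = true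
    · rw [if_pos (by simpa [pvUrl] using hs)]
      rw [if_pos hs, if_neg (by rw [hs]; simp), if_neg (by rw [hs]; simp)]
      rfl
    · by_cases hs2 : PySem.Str.isIn "s3://" (pvUrl x) = true
      · rw [if_neg (by simpa [pvUrl] using hs), if_pos (by simpa [pvUrl] using hs2)]
        rw [if_neg hs, if_pos (by rw [Bool.not_eq_true] at hs; rw [hs, hs2]; rfl),
            if_neg (by rw [Bool.not_eq_true] at hs; rw [hs, hs2]; simp)]
        rfl
      · rw [if_neg (by simpa [pvUrl] using hs), if_neg (by simpa [pvUrl] using hs2)]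
        rw [if_neg hs, if_neg (by rw [Bool.not_eq_true] at hs hs2; rw [hs, hs2]; simp),
            if_pos (by rw [Bool.not_eq_true] at hs hs2; rw [hs, hs2]; rfl)]
        rfl
  | case3 l h0 h1 mid a b ihA ihB =>
    conv_rhs => rw [← List.take_append_drop mid l]
    simp only [List.countP_append]
    simp only [a, b]
    rw [ihA, ihB]
    push_cast
    rfl

-- ===== VERDICT (by name: the statement is the Claim_ definition above) =====
theorem extract_access_methods_spec : Claim_equal_extract_access_methods := by
  intro umm _
  unfold Spec_extract_access_methods extract_access_methods extract_access_methods_alt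
  show (List.foldl pvStep (((PySem.Dict.empty.insert "https" 0).insert "s3" 0).insert "other" 0) _).items = _
  rw [show ((PySem.Dict.empty.insert "https" (0:Int)).insert "s3" 0).insert "other" 0
      = PySem.Dict.mk [("https", 0), ("s3", 0), ("other", 0)] from rfl]
  rw [fold_items, pvGo_eq]
  simp
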